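-- pv_equiv track=rewrite | github.com/CalinaBorzan/AMD-ontology | evaluation/umls/run_umls_validation.py | build_root_map
-- ===== SOURCE A (Python) =====
-- CANONICAL_ROOTS = {"Disease", "Treatment", "Biomarker", "DiagnosticMethod",
--                     "RiskFactor", "ClinicalOutcome", "MolecularTarget"}
--
-- def build_root_map(schema_classes: dict) -> dict:
--     """Walk the `subclasses` structure of the schema to find each class's
--     topmost ancestor that is a canonical root. Returns {class_name: root}.
--
--     This replaces per-subclass hardcoded mappings (e.g. "Gene → Biomarker")
--     with schema-driven normalization: any class the schema declares as a
--     subclass of Biomarker is automatically normalized to Biomarker, even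
--     if we've never heard of it (SurgicalTherapy, GeneticBiomarker, etc.)."""
--     parent_of = {}
--     for pname, pinfo in schema_classes.items():
--         if not isinstance(pinfo, dict):
--             continue
--         for child in pinfo.get("subclasses", []):
--             parent_of[child] = pname
--
--     def walk(name, seen=None):
--         if seen is None:
--             seen = set()
--         if name in CANONICAL_ROOTS:
--             return name
--         if name in seen or name not in schema_classes:
--             return name
--         seen.add(name)
--         parent = parent_of.get(name)
--         if parent is None:
--             return name  # top-level class that's not one of our canonical roots
--         return walk(parent, seen)
--
--     return {cname: walk(cname) for cname in schema_classes}
-- ===== SOURCE B (Python) =====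
-- CANONICAL_ROOTS = {"Disease", "Treatment", "Biomarker", "DiagnosticMethod",
--                     "RiskFactor", "ClinicalOutcome", "MolecularTarget"}
--
-- def _settle(memo, n, path):
--     """Finish one climb: record an answer for every node on the path."""
--     if n in path:
--         # cycle: members resolve to themselves, nodes feeding in to the entry n
--         i = path.index(n)
--         for m in path[:i]:
--             memo[m] = n
--         for m in path[i:]:
--             memo[m] = m
--         return n
--     r = memo.get(n, n)
--     for m in path:
--         memo[m] = r
--     memo[n] = r
--     return r
--
-- def _climb(schema_classes, parent_of, memo, start):
--     """Follow parent links iteratively, stopping at memoized/terminal nodes."""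
--     path = []
--     n = start
--     while (n not in memo and n not in CANONICAL_ROOTS
--            and n in schema_classes and n not in path and n in parent_of):
--         path.append(n)
--         n = parent_of[n]
--     return _settle(memo, n, path)
--
-- def build_root_map(schema_classes: dict) -> dict:
--     parent_of = {child: pname
--                  for pname, pinfo in schema_classes.items()
--                  if isinstance(pinfo, dict)
--                  for child in pinfo.get("subclasses", [])}
--     memo = {}
--     out = {}
--     for cname in schema_classes:
--         out[cname] = _climb(schema_classes, parent_of, memo, cname)
--     return out
-- ===== Notes on version B (the rewrite author's own statement) =====
-- stated objective: alternative
-- what changed: A resolves every class with its own fresh recursive walk up the parent chain, sharing nothing between classes; B builds parent_of with one dict comprehension and resolves classes with an iterative climb that shares one global memo across all classes (every node on a finished path is memoized: cycle members to themselves, feeders to the cycle entry), so later climbs stop at any already-resolved node.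
import Mathlib
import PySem

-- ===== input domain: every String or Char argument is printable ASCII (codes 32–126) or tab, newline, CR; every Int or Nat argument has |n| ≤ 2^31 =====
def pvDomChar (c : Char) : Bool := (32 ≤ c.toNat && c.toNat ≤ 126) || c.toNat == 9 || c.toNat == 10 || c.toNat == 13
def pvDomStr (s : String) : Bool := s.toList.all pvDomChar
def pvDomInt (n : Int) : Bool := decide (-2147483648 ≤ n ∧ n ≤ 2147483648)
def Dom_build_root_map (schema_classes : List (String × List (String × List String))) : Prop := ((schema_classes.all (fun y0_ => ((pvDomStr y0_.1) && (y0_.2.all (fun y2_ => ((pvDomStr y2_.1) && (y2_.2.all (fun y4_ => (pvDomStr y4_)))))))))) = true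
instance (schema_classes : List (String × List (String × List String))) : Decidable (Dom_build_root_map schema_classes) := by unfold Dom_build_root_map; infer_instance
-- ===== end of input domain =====

-- B replaces A's per-class recursive walk with a fresh `seen` set (restarted from scratch for
-- every class) by a single memo dict shared across all classes: each class is resolved by an
-- iterative climb along parent links tracking only the current path, every node on the path
-- is memoized, and later climbs stop at any memoized node.

-- strict decrease of an "unused keys" measure (cited by the termination proofs of both ports)
lemma pvCountLt {α : Type} (p q : α → Bool) (hpq : ∀ x, q x = true → p x = true) :
    ∀ l : List α, ∀ x0, x0 ∈ l → p x0 = true → q x0 = false →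
    (l.filter q).length < (l.filter p).length := by
  intro l
  induction l with
  | nil => intro x0 h; cases h
  | cons a t ih =>
    intro x0 hmem hp hq
    have hmono : (t.filter q).length ≤ (t.filter p).length :=
      (List.monotone_filter_right t hpq).length_le
    rcases List.mem_cons.mp hmem with rfl | ht
    · rw [List.filter_cons, List.filter_cons, hp, hq]
      simpa using Nat.lt_succ_of_le hmono
    · rw [List.filter_cons, List.filter_cons]
      have := ih x0 ht hp hq
      cases hqa : q a <;> cases hpa : p a <;> simp_all

-- ===== PORT A =====
def pvRoots : List String := ["Disease", "Treatment", "Biomarker", "DiagnosticMethod",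
    "RiskFactor", "ClinicalOutcome", "MolecularTarget"]

-- the Python argument is a dict: materialize the association list with dict semantics
def pvItems (schema_classes : List (String × List (String × List String))) :
    List (String × List (String × List String)) :=
  (PySem.Dict.ofList schema_classes).items

-- pinfo.get("subclasses", [])   (the isinstance(pinfo, dict) guard is always true under the type convention)
def pvSubclasses (pinfo : List (String × List String)) : List String :=
  (PySem.Dict.ofList pinfo).getD "subclasses" []

def pvParentOf (items : List (String × List (String × List String))) :
    PySem.Dict String String :=
  items.foldl (fun d p => (pvSubclasses p.2).foldl (fun d c => d.insert c p.1) d)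
    PySem.Dict.empty

lemma pvFilterDec (ks : List String) (seen : PySem.Set String) (name : String)
    (h1 : name ∈ ks) (h2 : name ∉ seen) :
    (List.filter (fun k => decide (k ∉ PySem.Set.add seen name)) ks).length <
    (List.filter (fun k => decide (k ∉ seen)) ks).length := by
  refine pvCountLt _ _ ?_ ks name h1 ?_ ?_
  · intro x hx
    simp only [decide_eq_true_eq] at hx ⊢
    exact fun hmem => hx ((PySem.Set.mem_add _ _ _).mpr (Or.inl hmem))
  · simpa using h2
  · simp [PySem.Set.mem_add]

-- walk(name, seen): recursive ascent, one fresh `seen` set per class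
def pvWalk (ks : List String) (par : PySem.Dict String String)
    (name : String) (seen : PySem.Set String) : String :=
  if name ∈ pvRoots then name
  else if name ∈ seen ∨ name ∉ ks then name
  else
    match par.get? name with
    | none => name
    | some p => pvWalk ks par p (PySem.Set.add seen name)
termination_by (List.filter (fun k => decide (k ∉ seen)) ks).length
decreasing_by
  rename_i _ h
  rw [not_or, not_not] at h
  exact pvFilterDec ks seen name h.2 h.1

def build_root_map (schema_classes : List (String × List (String × List String))) :
    List (String × String) :=
  let items := pvItems schema_classes
  let parent_of := pvParentOf items
  -- {cname: walk(cname) for cname in schema_classes}  (dict keys are distinct)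
  items.map (fun p => (p.1, pvWalk (items.map Prod.fst) parent_of p.1 PySem.Set.empty))

-- ===== PORT B =====
-- n in CANONICAL_ROOTS  (membership in the literal set)
def bRoots (s : String) : Bool :=
  s == "Disease" || s == "Treatment" || s == "Biomarker" || s == "DiagnosticMethod" ||
  s == "RiskFactor" || s == "ClinicalOutcome" || s == "MolecularTarget"

-- parent_of = {child: pname for pname, pinfo in schema_classes.items() for child in pinfo.get("subclasses", [])}
def bParentMap (schema_classes : List (String × List (String × List String))) :
    PySem.Dict String String :=
  PySem.Dict.ofList
    ((PySem.Dict.ofList schema_classes).items.flatMap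
      (fun pr => ((PySem.Dict.ofList pr.2).getD "subclasses" []).map (fun child => (child, pr.1))))

-- _settle: record an answer for every node on the finished path
def bSettle (memo : PySem.Dict String String) (n : String) (path : List String) :
    String × PySem.Dict String String :=
  match PySem.List.index? path n with
  | some i =>
      (n, (path.drop i).foldl (fun m x => m.insert x x)
            ((path.take i).foldl (fun m x => m.insert x n) memo))
  | none =>
      let r := memo.getD n n
      (r, (path.foldl (fun m x => m.insert x r) memo).insert n r)

lemma bFilterDec (ks path : List String) (n : String)
    (h1 : n ∈ ks) (h2 : n ∉ path) :
    (ks.filter (fun k => !(path ++ [n]).contains k)).length <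
    (ks.filter (fun k => !path.contains k)).length := by
  refine pvCountLt _ _ ?_ ks n h1 ?_ ?_
  · intro x hx
    simp only [Bool.not_eq_eq_eq_not, Bool.not_true, List.contains_eq_mem,
      List.mem_append, decide_eq_false_iff_not, not_or] at hx ⊢
    exact hx.1
  · simpa using h2
  · simp

-- _climb: the while loop; state is (n, path)
def bClimb (sc : PySem.Dict String (List (String × List String)))
    (par memo : PySem.Dict String String) (n : String) (path : List String) :
    String × PySem.Dict String String :=
  if memo.contains n || bRoots n || !sc.contains n || path.contains n then
    bSettle memo n path
  else
    match par.get? n with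
    | none => bSettle memo n path
    | some p => bClimb sc par memo p (path ++ [n])
termination_by (sc.keys.filter (fun k => !path.contains k)).length
decreasing_by
  rename_i hguard
  simp only [Bool.or_eq_true, Bool.not_eq_true', not_or, List.contains_eq_mem,
    decide_eq_true_eq] at hguard
  obtain ⟨⟨⟨-, -⟩, hsc⟩, hnp⟩ := hguard
  exact bFilterDec sc.keys path n
    ((PySem.Dict.contains_iff_mem_keys sc n).mp (by simpa using hsc)) hnp

-- the for loop over the classes, threading the memo
def bRun (sc : PySem.Dict String (List (String × List String)))
    (par : PySem.Dict String String) :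
    List (String × List (String × List String)) → PySem.Dict String String →
    List (String × String)
  | [], _ => []
  | pr :: rest, memo =>
      let res := bClimb sc par memo pr.1 []
      (pr.1, res.1) :: bRun sc par rest res.2

def build_root_map_alt (schema_classes : List (String × List (String × List String))) :
    List (String × String) :=
  let sc := PySem.Dict.ofList schema_classes
  bRun sc (bParentMap schema_classes) sc.items PySem.Dict.empty

-- ===== PRECONDITION & SPEC =====
def Spec_build_root_map (schema_classes : List (String × List (String × List String))) (out : List (String × String)) : Prop := out = build_root_map_alt schema_classes
instance (schema_classes : List (String × List (String × List String))) (out : List (String × String)) : Decidable (Spec_build_root_map schema_classes out) := by unfold Spec_build_root_map; infer_instance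

-- ===== CLAIM (what is proved, stated in full; the proofs are below) =====
def Claim_equal_build_root_map : Prop := ∀ (schema_classes : List (String × List (String × List String))), Dom_build_root_map schema_classes → Spec_build_root_map schema_classes (build_root_map schema_classes)

-- ===== LEMMAS AND PROOFS =====

lemma bRoots_iff (s : String) : bRoots s = true ↔ s ∈ pvRoots := by
  simp [bRoots, pvRoots]
  tauto

lemma bParentMap_eq (schema_classes : List (String × List (String × List String))) :
    bParentMap schema_classes = pvParentOf (pvItems schema_classes) := by
  unfold bParentMap pvParentOf pvItems
  rw [show (PySem.Dict.ofList
      ((PySem.Dict.ofList schema_classes).items.flatMap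
        (fun pr => ((PySem.Dict.ofList pr.2).getD "subclasses" []).map
          (fun child => (child, pr.1)))) : PySem.Dict String String) =
      ((PySem.Dict.ofList schema_classes).items.flatMap
        (fun pr => ((PySem.Dict.ofList pr.2).getD "subclasses" []).map
          (fun child => (child, pr.1)))).foldl
        (fun d p => d.insert p.1 p.2) PySem.Dict.empty from rfl]
  rw [List.foldl_flatMap]
  apply PySem.List.foldl_congr_mem
  intro d pr _
  rw [List.foldl_map]
  rfl

-- A's walk in "successor function" form: step n = none exactly where the walk stops at n
def pvStep (ks : List String) (par : PySem.Dict String String) (n : String) : Option String :=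
  if n ∈ pvRoots ∨ n ∉ ks then none else par.get? n

lemma pvWalk_eq (ks : List String) (par : PySem.Dict String String)
    (n : String) (seen : PySem.Set String) :
    pvWalk ks par n seen =
      match pvStep ks par n with
      | none => n
      | some p => if n ∈ seen then n else pvWalk ks par p (PySem.Set.add seen n) := by
  rw [pvWalk, pvStep]
  by_cases hr : n ∈ pvRoots
  · simp [hr]
  · by_cases hk : n ∈ ks
    · by_cases hs : n ∈ seen <;> cases hp : par.get? n <;> simp [hr, hk, hs]
    · simp [hr, hk]

-- walk returns its argument when the step is none or the node was already seen
lemma pvWalk_stop (ks : List String) (par : PySem.Dict String String)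
    (n : String) (seen : PySem.Set String)
    (h : pvStep ks par n = none ∨ n ∈ seen) :
    pvWalk ks par n seen = n := by
  rw [pvWalk_eq]
  rcases h with h | h
  · rw [h]
  · cases hp : pvStep ks par n <;> simp [h]

-- walking consumes a fresh chain segment q, adding it to `seen`
lemma pvWalk_seg (ks : List String) (par : PySem.Dict String String)
    (q : List String) (t : String) (seen : PySem.Set String)
    (hc : List.IsChain (fun a b => pvStep ks par a = some b) (q ++ [t]))
    (hn : q.Nodup) (hd : ∀ x ∈ q, x ∉ seen) :
    pvWalk ks par ((q ++ [t]).headI) seen = pvWalk ks par t (q.foldl PySem.Set.add seen) := by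
  induction q generalizing seen with
  | nil => rfl
  | cons a q' ih =>
    have hstep : pvStep ks par a = some ((q' ++ [t]).headI) := by
      rcases List.isChain_cons.mp hc with ⟨hlink, _⟩
      apply hlink
      cases q' <;> simp
    have hns : a ∉ seen := hd a (List.mem_cons_self ..)
    rw [List.cons_append, List.headI_cons, pvWalk_eq, hstep]
    simp only [if_neg hns]
    apply ih (PySem.Set.add seen a) (List.isChain_cons.mp hc).2 (List.nodup_cons.mp hn).2
    intro x hx hmem
    rcases (PySem.Set.mem_add _ _ _).mp hmem with h | h
    · exact hd x (List.mem_cons_of_mem _ hx) h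
    · exact (List.nodup_cons.mp hn).1 (h ▸ hx)

-- the memo invariant: every memo entry is the walk's answer from any seen-set
-- that avoids the memoized keys
def pvGood (ks : List String) (par : PySem.Dict String String)
    (memo : PySem.Dict String String) : Prop :=
  ∀ m v, memo.get? m = some v → ∀ S : PySem.Set String,
    (∀ x ∈ S, memo.contains x = false) → pvWalk ks par m S = v

lemma pvGood_empty (ks : List String) (par : PySem.Dict String String) :
    pvGood ks par PySem.Dict.empty := by
  intro m v hmv
  rw [PySem.Dict.get?_empty] at hmv
  cases hmv

-- closed form for the batched memo updates
lemma pvGetFoldlInsert (l : List String) (f : String → String)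
    (memo : PySem.Dict String String) (hnd : l.Nodup) (k : String) :
    (l.foldl (fun m x => m.insert x (f x)) memo).get? k =
      if k ∈ l then some (f k) else memo.get? k := by
  induction l generalizing memo with
  | nil => simp
  | cons a t ih =>
    rw [List.foldl_cons, ih _ (List.nodup_cons.mp hnd).2]
    by_cases ht : k ∈ t
    · simp [ht]
    · rw [if_neg ht, PySem.Dict.get?_insert]
      by_cases hka : k = a
      · subst hka; simp
      · simp [hka, ht]

-- membership in an accumulated seen-set
lemma pvMemFoldlAdd (S : PySem.Set String) (q : List String) (x : String) :
    x ∈ q.foldl PySem.Set.add S ↔ x ∈ S ∨ x ∈ q :=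
  PySem.Set.mem_update S q x

-- closed form of the batched update "path ↦ r, n ↦ r"
lemma pvGetUpd (path : List String) (n r : String) (memo : PySem.Dict String String)
    (H2 : path.Nodup) (k : String) :
    ((path.foldl (fun m x => m.insert x r) memo).insert n r).get? k =
      if k = n ∨ k ∈ path then some r else memo.get? k := by
  rw [PySem.Dict.get?_insert, pvGetFoldlInsert path (fun _ => r) memo H2 k]
  by_cases hn : k = n <;> by_cases hp : k ∈ path <;> simp [hn, hp]

-- a walk started at any suffix element of the current path ends wherever the
-- walk from the stop node ends
lemma pvWalkFromPathElem (ks : List String) (par : PySem.Dict String String)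
    (path : List String) (n m : String) (S : PySem.Set String)
    (H2 : path.Nodup)
    (H3 : List.IsChain (fun a b => pvStep ks par a = some b) (path ++ [n]))
    (hm : m ∈ path)
    (hS : ∀ x ∈ S, x ∉ path) :
    ∃ suf : List String, (∀ x ∈ (m :: suf), x ∈ path) ∧
      pvWalk ks par m S = pvWalk ks par n ((m :: suf).foldl PySem.Set.add S) := by
  obtain ⟨pre, suf, hsplit⟩ := List.append_of_mem hm
  refine ⟨suf, by intro x hx; rw [hsplit]; exact List.mem_append_right _ hx, ?_⟩
  have hseg := pvWalk_seg ks par (m :: suf) n S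
    (H3.suffix ⟨pre, by rw [hsplit]; simp⟩)
    ((List.Nodup.of_append_right (hsplit ▸ H2)))
    (fun x hx hxS => hS x hxS (by rw [hsplit]; exact List.mem_append_right _ hx))
  exact hseg

-- settle at a non-cycle stop node n: the generic "r := memo.get(n, n)" case
lemma bSettle_flat (ks : List String) (par : PySem.Dict String String)
    (memo : PySem.Dict String String) (n : String) (path : List String)
    (H5 : pvGood ks par memo)
    (H2 : path.Nodup)
    (H3 : List.IsChain (fun a b => pvStep ks par a = some b) (path ++ [n]))
    (H4 : ∀ x ∈ path, memo.contains x = false)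
    (hnp : n ∉ path)
    (hval : ∀ S : PySem.Set String, (∀ x ∈ S, memo.contains x = false) →
      pvWalk ks par n S = memo.getD n n) :
    (bSettle memo n path).1 = pvWalk ks par ((path ++ [n]).headI) PySem.Set.empty ∧
      pvGood ks par (bSettle memo n path).2 := by
  have hidx : PySem.List.index? path n = none := (PySem.List.index?_eq_none_iff path n).mpr hnp
  have hred : bSettle memo n path =
      (memo.getD n n,
       (path.foldl (fun m x => m.insert x (memo.getD n n)) memo).insert n (memo.getD n n)) := by
    rw [bSettle, hidx]
  rw [hred]
  have hstart : pvWalk ks par ((path ++ [n]).headI) PySem.Set.empty =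
      pvWalk ks par n (path.foldl PySem.Set.add PySem.Set.empty) :=
    pvWalk_seg ks par path n PySem.Set.empty H3 H2 (by intro x _ h; cases h)
  constructor
  · rw [hstart]
    exact (hval _ (fun x hx => by
      rcases (pvMemFoldlAdd _ _ _).mp hx with h | h
      · cases h
      · exact H4 x h)).symm
  · intro m v hv S hS
    have hform := pvGetUpd path n (memo.getD n n) memo H2
    have hS' : ∀ x ∈ S, x ≠ n ∧ x ∉ path ∧ memo.contains x = false := by
      intro x hx
      have h := hS x hx
      rw [PySem.Dict.contains_eq_isSome_get?, hform x] at h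
      split_ifs at h with hcond
      · simp at h
      · rw [not_or] at hcond
        exact ⟨hcond.1, hcond.2, by rw [PySem.Dict.contains_eq_isSome_get?]; exact h⟩
    rw [hform m] at hv
    split_ifs at hv with hcond
    · have hvr : v = memo.getD n n := (Option.some_inj.mp hv).symm
      rcases hcond with hmn | hmem
      · rw [hmn, hvr]
        exact hval S (fun x hx => (hS' x hx).2.2)
      · obtain ⟨suf, hsub, hw⟩ := pvWalkFromPathElem ks par path n m S H2 H3 hmem
          (fun x hx => (hS' x hx).2.1)
        rw [hw, hvr]
        exact hval _ (fun x hx => by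
          rcases (pvMemFoldlAdd _ _ _).mp hx with h | h
          · exact (hS' x h).2.2
          · exact H4 x (hsub x h))
    · exact H5 m v hv S (fun x hx => (hS' x hx).2.2)

-- settle on a cycle: n reappears on the path at index i
lemma bSettle_cycle (ks : List String) (par : PySem.Dict String String)
    (memo : PySem.Dict String String) (n : String) (path : List String) (i : Nat)
    (H5 : pvGood ks par memo)
    (H2 : path.Nodup)
    (H3 : List.IsChain (fun a b => pvStep ks par a = some b) (path ++ [n]))
    (hidx : PySem.List.index? path n = some i) :
    (bSettle memo n path).1 = pvWalk ks par ((path ++ [n]).headI) PySem.Set.empty ∧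
      pvGood ks par (bSettle memo n path).2 := by
  have hred : bSettle memo n path =
      (n, (path.drop i).foldl (fun m x => m.insert x x)
            ((path.take i).foldl (fun m x => m.insert x n) memo)) := by
    rw [bSettle, hidx]
  rw [hred]
  obtain ⟨pre, suf, hsplit, hlen, hnpre⟩ := (PySem.List.index?_eq_some_iff path n i).mp hidx
  have htake : path.take i = pre := by rw [hsplit]; exact List.take_left' hlen
  have hdrop : path.drop i = n :: suf := by rw [hsplit]; exact List.drop_left' hlen
  have hnd : (pre ++ n :: suf).Nodup := hsplit ▸ H2
  have hndpre : pre.Nodup := hnd.of_append_left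
  have hndns : (n :: suf).Nodup := hnd.of_append_right
  have hnpath : n ∈ path := by
    rw [hsplit]; exact List.mem_append_right _ (List.mem_cons_self ..)
  have hform : ∀ k, ((path.drop i).foldl (fun m x => m.insert x x)
      ((path.take i).foldl (fun m x => m.insert x n) memo)).get? k =
      if k ∈ n :: suf then some k
      else if k ∈ pre then some n else memo.get? k := by
    intro k
    rw [htake, hdrop, pvGetFoldlInsert (n :: suf) (fun x => x) _ hndns k,
      pvGetFoldlInsert pre (fun _ => n) _ hndpre k]
  have hstart : pvWalk ks par ((path ++ [n]).headI) PySem.Set.empty =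
      pvWalk ks par n (path.foldl PySem.Set.add PySem.Set.empty) :=
    pvWalk_seg ks par path n PySem.Set.empty H3 H2 (by intro x _ h; cases h)
  constructor
  · rw [hstart]
    exact (pvWalk_stop ks par n _
      (Or.inr ((pvMemFoldlAdd _ _ _).mpr (Or.inr hnpath)))).symm
  · intro m v hv S hS
    have hS' : ∀ x ∈ S, x ∉ path ∧ memo.contains x = false := by
      intro x hx
      have h := hS x hx
      rw [PySem.Dict.contains_eq_isSome_get?, hform x] at h
      split_ifs at h with h1 h2
      · simp at h
      · simp at h
      · refine ⟨?_, by rw [PySem.Dict.contains_eq_isSome_get?]; exact h⟩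
        rw [hsplit]
        intro hmem
        rcases List.mem_append.mp hmem with hm | hm
        · exact h2 hm
        · exact h1 hm
    rw [hform m] at hv
    split_ifs at hv with h1 h2
    · -- m on the cycle: walks back around to m itself
      have hvm : v = m := (Option.some_inj.mp hv).symm
      rw [hvm]
      have hchain_big : List.IsChain (fun a b => pvStep ks par a = some b)
          ((n :: suf) ++ [n]) :=
        H3.suffix ⟨pre, by rw [hsplit]; simp⟩
      rcases List.mem_cons.mp h1 with hmn | hmsuf
      · -- m = n : go around the whole cycle once
        rw [hmn]
        have hseg := pvWalk_seg ks par (n :: suf) n S hchain_big hndns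
          (fun x hx hxS => (hS' x hxS).1 (by rw [hsplit]; exact List.mem_append_right _ hx))
        rw [List.cons_append, List.headI_cons] at hseg
        rw [hseg]
        exact pvWalk_stop ks par n _
          (Or.inr ((pvMemFoldlAdd _ _ _).mpr (Or.inr (List.mem_cons_self ..))))
      · -- m strictly inside the cycle: walk m → n, then n → m, stop at m
        obtain ⟨a', b', hsuf⟩ := List.append_of_mem hmsuf
        have hns_split : n :: suf = (n :: a') ++ (m :: b') := by rw [hsuf]; rfl
        have hmem_path : ∀ x, x ∈ n :: suf → x ∈ path := by
          intro x hx; rw [hsplit]; exact List.mem_append_right _ hx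
        have hseg1 := pvWalk_seg ks par (m :: b') n S
          (hchain_big.suffix ⟨n :: a', by rw [hns_split]; simp⟩)
          ((hns_split ▸ hndns).of_append_right)
          (fun x hx hxS => (hS' x hxS).1
            (hmem_path x (by rw [hns_split]; exact List.mem_append_right _ hx)))
        rw [List.cons_append, List.headI_cons] at hseg1
        have hseg2 := pvWalk_seg ks par (n :: a') m ((m :: b').foldl PySem.Set.add S)
          (hchain_big.prefix ⟨b' ++ [n], by rw [hns_split]; simp⟩)
          ((hns_split ▸ hndns).of_append_left)
          (by
            intro x hx hxS
            rcases (pvMemFoldlAdd _ _ _).mp hxS with hxs | hxin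
            · exact absurd (hmem_path x (by rw [hns_split]; exact List.mem_append_left _ hx)) (hS' x hxs).1
            · exact (List.nodup_append.mp (hns_split ▸ hndns)).2.2 x hx x hxin rfl)
        rw [List.cons_append, List.headI_cons] at hseg2
        rw [hseg1, hseg2]
        exact pvWalk_stop ks par m _
          (Or.inr ((pvMemFoldlAdd _ _ _).mpr
            (Or.inl ((pvMemFoldlAdd _ _ _).mpr (Or.inr (List.mem_cons_self ..))))))
    · -- m feeds into the cycle: walk m → n, stop at n
      have hvn : v = n := (Option.some_inj.mp hv).symm
      rw [hvn]
      obtain ⟨a, b, hpre⟩ := List.append_of_mem h2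
      have hq_split : path = a ++ (m :: (b ++ n :: suf)) := by rw [hsplit, hpre]; simp
      have hseg := pvWalk_seg ks par (m :: (b ++ n :: suf)) n S
        (H3.suffix ⟨a, by rw [hq_split]; simp⟩)
        ((hq_split ▸ H2).of_append_right)
        (fun x hx hxS => (hS' x hxS).1 (by rw [hq_split]; exact List.mem_append_right _ hx))
      rw [List.cons_append, List.headI_cons] at hseg
      rw [hseg]
      exact pvWalk_stop ks par n _
        (Or.inr ((pvMemFoldlAdd _ _ _).mpr
          (Or.inr (List.mem_cons_of_mem _ (List.mem_append_right _ (List.mem_cons_self ..))))))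
    · exact H5 m v hv S (fun x hx => (hS' x hx).2)

-- main loop lemma: the climb returns the walk's answer from the path start and
-- preserves the memo invariant
lemma bClimb_spec (sc : PySem.Dict String (List (String × List String)))
    (par : PySem.Dict String String) :
    ∀ (memo : PySem.Dict String String) (n : String) (path : List String),
    pvGood sc.keys par memo →
    path.Nodup →
    List.IsChain (fun a b => pvStep sc.keys par a = some b) (path ++ [n]) →
    (∀ x ∈ path, memo.contains x = false) →
    (bClimb sc par memo n path).1 =
        pvWalk sc.keys par ((path ++ [n]).headI) PySem.Set.empty ∧
      pvGood sc.keys par (bClimb sc par memo n path).2 := by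
  intro memo n path
  induction n, path using bClimb.induct sc par memo with
  | case1 n path hguard =>
    intro H5 H2 H3 H4
    have hred : bClimb sc par memo n path = bSettle memo n path := by
      rw [bClimb, if_pos hguard]
    rw [hred]
    cases hidx : PySem.List.index? path n with
    | some i => exact bSettle_cycle _ _ _ _ _ _ H5 H2 H3 hidx
    | none =>
      have hnp : n ∉ path := (PySem.List.index?_eq_none_iff path n).mp hidx
      refine bSettle_flat _ _ _ _ _ H5 H2 H3 H4 hnp ?_
      cases hmget : memo.get? n with
      | some r =>
        have hgd : memo.getD n n = r := PySem.Dict.getD_of_get?_eq_some memo n hmget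
        intro S hS
        rw [hgd]
        exact H5 n r hmget S hS
      | none =>
        have hmc : memo.contains n = false := by
          rw [PySem.Dict.contains_eq_isSome_get?, hmget]; rfl
        have hgd : memo.getD n n = n := PySem.Dict.getD_of_not_contains memo n hmc
        have hstep : pvStep sc.keys par n = none := by
          simp only [Bool.or_eq_true, Bool.not_eq_true', List.contains_eq_mem,
            decide_eq_true_eq] at hguard
          rw [pvStep, if_pos]
          rcases hguard with ((h | h) | h) | h
          · rw [h] at hmc; cases hmc
          · exact Or.inl ((bRoots_iff n).mp h)
          · exact Or.inr (fun hk => by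
              rw [(PySem.Dict.contains_iff_mem_keys sc n).mpr hk] at h; cases h)
          · exact absurd h hnp
        intro S _
        rw [hgd]
        exact pvWalk_stop _ _ _ _ (Or.inl hstep)
  | case2 n path hguard hpar =>
    intro H5 H2 H3 H4
    have hred : bClimb sc par memo n path = bSettle memo n path := by
      rw [bClimb, if_neg hguard, hpar]
    rw [hred]
    simp only [Bool.or_eq_true, Bool.not_eq_true', not_or, List.contains_eq_mem,
      decide_eq_true_eq] at hguard
    obtain ⟨⟨⟨hm, hr⟩, hsc⟩, hnp⟩ := hguard
    have hm' : memo.contains n = false := by simpa using hm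
    have hr' : n ∉ pvRoots := fun h => hr ((bRoots_iff n).mpr h)
    have hks : n ∈ sc.keys :=
      (PySem.Dict.contains_iff_mem_keys sc n).mp (by simpa using hsc)
    refine bSettle_flat _ _ _ _ _ H5 H2 H3 H4 hnp ?_
    have hgd : memo.getD n n = n := PySem.Dict.getD_of_not_contains memo n hm'
    have hstep : pvStep sc.keys par n = none := by
      rw [pvStep, if_neg (by simp [hr', hks])]
      exact hpar
    intro S _
    rw [hgd]
    exact pvWalk_stop _ _ _ _ (Or.inl hstep)
  | case3 n path hguard p hpar ih =>
    intro H5 H2 H3 H4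
    have hred : bClimb sc par memo n path = bClimb sc par memo p (path ++ [n]) := by
      rw [bClimb, if_neg hguard, hpar]
    simp only [Bool.or_eq_true, Bool.not_eq_true', not_or, List.contains_eq_mem,
      decide_eq_true_eq] at hguard
    obtain ⟨⟨⟨hm, hr⟩, hsc⟩, hnpath⟩ := hguard
    have hm' : memo.contains n = false := by simpa using hm
    have hr' : n ∉ pvRoots := fun h => hr ((bRoots_iff n).mpr h)
    have hks : n ∈ sc.keys :=
      (PySem.Dict.contains_iff_mem_keys sc n).mp (by simpa using hsc)
    have hstepn : pvStep sc.keys par n = some p := by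
      rw [pvStep, if_neg (by simp [hr', hks])]
      exact hpar
    have H2' : (path ++ [n]).Nodup := by
      rw [List.nodup_append]
      refine ⟨H2, List.nodup_singleton n, ?_⟩
      intro a ha b hb
      obtain rfl : b = n := List.mem_singleton.mp hb
      exact fun heq => hnpath (heq ▸ ha)
    have H3' : List.IsChain (fun a b => pvStep sc.keys par a = some b)
        ((path ++ [n]) ++ [p]) := by
      rw [List.isChain_append]
      refine ⟨H3, by simp, ?_⟩
      intro x hx y hy
      rw [List.getLast?_concat] at hx
      simp only [List.head?_cons, Option.mem_def, Option.some_inj] at hx hy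
      rw [← hx, ← hy]
      exact hstepn
    have H4' : ∀ x ∈ path ++ [n], memo.contains x = false := by
      intro x hx
      rcases List.mem_append.mp hx with h | h
      · exact H4 x h
      · rw [List.mem_singleton.mp h]; exact hm'
    have hres := ih H5 H2' H3' H4'
    rw [hred]
    have hhead : ((path ++ [n]) ++ [p]).headI = (path ++ [n]).headI := by
      cases path <;> simp
    rw [← hhead]
    exact hres

-- the outer for loop: threading the memo through the climbs yields A's per-class walks
lemma bRun_eq (sc : PySem.Dict String (List (String × List String)))
    (par : PySem.Dict String String) :
    ∀ (its : List (String × List (String × List String)))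
      (memo : PySem.Dict String String),
      pvGood sc.keys par memo →
      bRun sc par its memo =
        its.map (fun p => (p.1, pvWalk sc.keys par p.1 PySem.Set.empty)) := by
  intro its
  induction its with
  | nil => intro memo _; rfl
  | cons pr t ih =>
    intro memo hgood
    have hres := bClimb_spec sc par memo pr.1 [] hgood List.nodup_nil
      (by simp) (by intro x h; cases h)
    rw [bRun, List.map_cons]
    rw [ih _ hres.2, hres.1]
    rfl

theorem build_root_map_eq_alt :
    ∀ (schema_classes : List (String × List (String × List String))),
    build_root_map schema_classes = build_root_map_alt schema_classes := by
  intro schema_classes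
  rw [build_root_map, build_root_map_alt]
  rw [bParentMap_eq]
  rw [bRun_eq (PySem.Dict.ofList schema_classes) (pvParentOf (pvItems schema_classes))
    (PySem.Dict.ofList schema_classes).items PySem.Dict.empty (pvGood_empty _ _)]
  rfl

-- ===== VERDICT (by name: the statement is the Claim_ definition above) =====
theorem build_root_map_spec : Claim_equal_build_root_map := by
  intro schema_classes _
  unfold Spec_build_root_map
  exact build_root_map_eq_alt schema_classes
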